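-- pv_equiv track=rewrite | github.com/Mirudhubasini-RC/judicial-case-doc | models/api.py | classify_document_by_keywords
-- ===== SOURCE A (Python) =====
-- def classify_document_by_keywords(text, keyword_map):
--     text = text.lower()  # Convert document text to lowercase for case-insensitive matching
--
--     # Initialize a dictionary to store match counts for each category
--     category_match_counts = {category: 0 for category in keyword_map.keys()}
--
--     # Check each word against all categories' keywords
--     for category, keywords in keyword_map.items():
--         for keyword in keywords:
--             if keyword.lower() in text:
--                 category_match_counts[category] += 1
--
--     # Get the category with the highest match count
--     sorted_categories = sorted(category_match_counts.items(), key=lambda x: x[1], reverse=True)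
--
--     top_category, top_count = sorted_categories[0]
--
--     if len(sorted_categories) > 1:
--         second_category, second_count = sorted_categories[1]
--         if abs(top_count - second_count) <= 10:
--             return f'{top_category}, {second_category}'
--
--     return top_category
-- ===== SOURCE B (Python) =====
-- def classify_document_by_keywords(text, keyword_map):
--     t = text.lower()
--     best = None    # (count, category) with the highest count, earliest first
--     second = None  # runner-up under the same rule
--     for category, keywords in keyword_map.items():
--         c = sum(1 for kw in keywords if kw.lower() in t)
--         if best is None or c > best[0]:
--             best, second = (c, category), best
--         elif second is None or c > second[0]:
--             second = (c, category)
--     top_count, top_category = best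
--     if second is not None and top_count - second[0] <= 10:
--         return f'{top_category}, {second[1]}'
--     return top_category
-- ===== Notes on version B (the rewrite author's own statement) =====
-- stated objective: alternative
-- what changed: B drops A's count-dictionary and full descending sort: one pass over the categories keeps a running (best, runner-up) pair, reproducing the tie-breaking of Python's stable sort via strict-greater updates.
import Mathlib
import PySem

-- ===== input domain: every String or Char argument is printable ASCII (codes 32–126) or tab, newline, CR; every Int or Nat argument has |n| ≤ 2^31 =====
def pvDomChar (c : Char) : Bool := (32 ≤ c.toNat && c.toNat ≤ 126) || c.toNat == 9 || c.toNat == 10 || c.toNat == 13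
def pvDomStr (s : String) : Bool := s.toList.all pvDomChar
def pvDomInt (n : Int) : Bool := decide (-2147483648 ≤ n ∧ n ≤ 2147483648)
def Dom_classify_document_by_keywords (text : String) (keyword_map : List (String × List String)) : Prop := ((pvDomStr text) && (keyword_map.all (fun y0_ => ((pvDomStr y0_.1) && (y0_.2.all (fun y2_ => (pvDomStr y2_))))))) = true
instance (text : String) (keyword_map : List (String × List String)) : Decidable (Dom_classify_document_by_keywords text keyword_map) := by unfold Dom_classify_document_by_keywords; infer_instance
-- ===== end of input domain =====

-- B replaces A's count-dictionary + full stable descending sort by a single running (best, runner-up) pass; equal return values on every nonempty keyword_map.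

-- ===== PORT A =====
def classify_document_by_keywords (text : String) (keyword_map : List (String × List String)) : String :=
  let t := PySem.Str.lower text
  let d0 := PySem.Dict.ofList keyword_map
  -- {category: 0 for category in keyword_map.keys()}
  let counts0 : PySem.Dict String Int :=
    d0.keys.foldl (fun d category => d.insert category 0) PySem.Dict.empty
  -- for category, keywords in keyword_map.items(): for keyword in keywords: if keyword.lower() in text: +1
  let counts :=
    d0.items.foldl (fun d p =>
      p.2.foldl (fun d keyword =>
        if PySem.Str.isIn (PySem.Str.lower keyword) t then d.modify p.1 0 (· + 1) else d) d) counts0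
  let s := PySem.List.sorted counts.items (fun x => x.2) true
  let top := PySem.List.pyGetD s 0 ("", 0)          -- sorted_categories[0]; IndexError (excluded by Pre_) if empty
  if 1 < s.length then
    let second := PySem.List.pyGetD s 1 ("", 0)
    if |top.2 - second.2| ≤ 10 then PySem.Str.join ", " [top.1, second.1] else top.1
  else top.1

-- ===== PORT B =====
-- one step of Source B's loop body: state = (best, second) as (count, category) options
def pvTop2Step (st : Option (Int × String) × Option (Int × String)) (c : Int) (category : String) :
    Option (Int × String) × Option (Int × String) :=
  match st with
  | (none, _) => (some (c, category), none)
  | (some b, sec) =>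
    if b.1 < c then (some (c, category), some b)
    else match sec with
      | none => (some b, some (c, category))
      | some s2 => if s2.1 < c then (some b, some (c, category)) else (some b, some s2)

def classify_document_by_keywords_alt (text : String) (keyword_map : List (String × List String)) : String :=
  let t := PySem.Str.lower text
  let st := (PySem.Dict.ofList keyword_map).items.foldl
      (fun st p => pvTop2Step st ((p.2.countP (fun kw => PySem.Str.isIn (PySem.Str.lower kw) t) : Int)) p.1)
      (none, none)
  match st with
  | (some b, some s2) => if b.1 - s2.1 ≤ 10 then PySem.Str.join ", " [b.2, s2.2] else b.2
  | (some b, none) => b.2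
  | (none, _) => ""      -- unreachable under Pre_ (Source B raises on an empty keyword_map)

-- ===== PRECONDITION & SPEC =====
-- A raises IndexError (sorted_categories[0]) exactly on an empty keyword_map; nothing else is excluded.
def Pre_classify_document_by_keywords (_text : String) (keyword_map : List (String × List String)) : Prop :=
  keyword_map ≠ []
instance (text : String) (keyword_map : List (String × List String)) : Decidable (Pre_classify_document_by_keywords text keyword_map) := by unfold Pre_classify_document_by_keywords; infer_instance
def pvWitness_classify_document_by_keywords : String × (List (String × List String)) :=
  ("a contract case", [("contract", ["contract", "clause"]), ("criminal", ["theft"])])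

def Spec_classify_document_by_keywords (text : String) (keyword_map : List (String × List String)) (out : String) : Prop := out = classify_document_by_keywords_alt text keyword_map
instance (text : String) (keyword_map : List (String × List String)) (out : String) : Decidable (Spec_classify_document_by_keywords text keyword_map out) := by unfold Spec_classify_document_by_keywords; infer_instance

-- ===== CLAIM (what is proved, stated in full; the proofs are below) =====
def Claim_equal_classify_document_by_keywords : Prop := ∀ (text : String) (keyword_map : List (String × List String)), Dom_classify_document_by_keywords text keyword_map → Pre_classify_document_by_keywords text keyword_map → Spec_classify_document_by_keywords text keyword_map (classify_document_by_keywords text keyword_map)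

-- ===== LEMMAS AND PROOFS =====

-- ---- the counting phase: A's dictionary holds exactly countP per category ----

-- inner loop at category c only touches key c, adding countP there
theorem pv_inner_self (q : String → Bool) (c : String) :
    ∀ (kws : List String) (d : PySem.Dict String Int),
      (kws.foldl (fun d kw => if q kw then d.modify c 0 (· + 1) else d) d).getD c 0
        = d.getD c 0 + (kws.countP q : Int) := by
  intro kws
  induction kws with
  | nil => intro d; simp
  | cons kw kws ih =>
    intro d
    simp only [List.foldl_cons, List.countP_cons]
    by_cases h : q kw
    · simp [h, ih, PySem.Dict.getD_modify_self]; ring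
    · simp [h, ih]

theorem pv_inner_ne (q : String → Bool) (c c' : String) (hne : c' ≠ c) :
    ∀ (kws : List String) (d : PySem.Dict String Int),
      (kws.foldl (fun d kw => if q kw then d.modify c 0 (· + 1) else d) d).getD c' 0
        = d.getD c' 0 := by
  intro kws
  induction kws with
  | nil => intro d; simp
  | cons kw kws ih =>
    intro d
    simp only [List.foldl_cons]
    by_cases h : q kw
    · simp [h, ih, PySem.Dict.getD_modify, hne]
    · simp [h, ih]

-- inner loop keeps the key list (the key it modifies is already present)
theorem pv_inner_keys (q : String → Bool) (c : String) :
    ∀ (kws : List String) (d : PySem.Dict String Int), c ∈ d.keys →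
      (kws.foldl (fun d kw => if q kw then d.modify c 0 (· + 1) else d) d).keys = d.keys := by
  intro kws
  induction kws with
  | nil => intro d _; rfl
  | cons kw kws ih =>
    intro d hc
    simp only [List.foldl_cons]
    by_cases h : q kw
    · have hk : (d.modify c 0 (· + 1)).keys = d.keys := by
        rw [PySem.Dict.keys_modify, PySem.Dict.keys_insert_of_contains]
        exact (PySem.Dict.contains_iff_mem_keys _ _).mpr hc
      rw [h]
      simp only [if_true]
      rw [ih _ (by rw [hk]; exact hc), hk]
    · simp [h, ih _ hc]

-- the outer loop, on keys distinct from c, leaves c's count alone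
theorem pv_outer_ne (q : String → Bool) (c : String) :
    ∀ (l : List (String × List String)) (d : PySem.Dict String Int), (∀ p ∈ l, p.1 ≠ c) →
      (l.foldl (fun d p => p.2.foldl (fun d kw => if q kw then d.modify p.1 0 (· + 1) else d) d) d).getD c 0
        = d.getD c 0 := by
  intro l
  induction l with
  | nil => intro d _; rfl
  | cons p l ih =>
    intro d h
    simp only [List.foldl_cons]
    rw [ih _ (fun x hx => h x (List.mem_cons_of_mem _ hx)),
        pv_inner_ne q p.1 c (fun he => h p (List.mem_cons_self) (he ▸ rfl))]

theorem pv_outer_keys (q : String → Bool) :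
    ∀ (l : List (String × List String)) (d : PySem.Dict String Int), (∀ p ∈ l, p.1 ∈ d.keys) →
      (l.foldl (fun d p => p.2.foldl (fun d kw => if q kw then d.modify p.1 0 (· + 1) else d) d) d).keys
        = d.keys := by
  intro l
  induction l with
  | nil => intro d _; rfl
  | cons p l ih =>
    intro d h
    simp only [List.foldl_cons]
    have hk := pv_inner_keys q p.1 p.2 d (h p List.mem_cons_self)
    rw [ih _ (fun x hx => by rw [hk]; exact h x (List.mem_cons_of_mem _ hx)), hk]

-- full counting loop: with distinct keys, the count at p.1 (p in the list) is countP of p's keywords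
theorem pv_count_at (q : String → Bool) (l : List (String × List String))
    (hnd : (l.map (·.1)).Nodup) (d : PySem.Dict String Int) (hz : ∀ k, d.getD k 0 = 0)
    (p : String × List String) (hp : p ∈ l) :
    (l.foldl (fun d p => p.2.foldl (fun d kw => if q kw then d.modify p.1 0 (· + 1) else d) d) d).getD p.1 0
      = (p.2.countP q : Int) := by
  obtain ⟨l1, l2, rfl⟩ := List.append_of_mem hp
  have hnd' := hnd
  rw [List.map_append, List.map_cons] at hnd'
  have h1 : ∀ x ∈ l1, x.1 ≠ p.1 := by
    intro x hx he
    exact (List.disjoint_of_nodup_append hnd') (List.mem_map_of_mem hx) (by simp [he])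
  have h2 : ∀ x ∈ l2, x.1 ≠ p.1 := by
    intro x hx he
    have := (List.nodup_append.mp hnd').2.1
    rw [List.nodup_cons] at this
    exact this.1 (he ▸ List.mem_map_of_mem hx)
  rw [List.foldl_append, List.foldl_cons]
  rw [pv_outer_ne q p.1 l2 _ h2, pv_inner_self, pv_outer_ne q p.1 l1 d h1, hz]
  simp

-- the zero-initialisation really is zero everywhere
theorem pv_init_zero : ∀ (ks : List String) (d : PySem.Dict String Int), (∀ k, d.getD k 0 = 0) →
    ∀ k, (ks.foldl (fun d category => d.insert category (0 : Int)) d).getD k 0 = 0 := by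
  intro ks
  induction ks with
  | nil => intro d h k; exact h k
  | cons c ks ih =>
    intro d h k
    simp only [List.foldl_cons]
    refine ih _ (fun k' => ?_) k
    rw [PySem.Dict.getD_insert]
    split <;> simp [h]

theorem pv_init_keys (ks : List String) (hnd : ks.Nodup) :
    (ks.foldl (fun d category => d.insert category (0 : Int)) PySem.Dict.empty).keys = ks := by
  have := PySem.Dict.keys_foldl_insert_key (ν := Int) ks (fun k => k) (fun _ _ => 0) PySem.Dict.empty
  simp only at this
  rw [this]
  rw [PySem.Dict.keys_empty, PySem.Set.update_nil_left]
  simp only [List.map_id']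
  exact PySem.Set.ofList_eq_self_of_nodup ks hnd

-- counts.items is exactly the per-category countP list, in dictionary order
theorem pv_counts_items (q : String → Bool) (l : List (String × List String))
    (hnd : (l.map (·.1)).Nodup) :
    (l.foldl (fun d p => p.2.foldl (fun d kw => if q kw then d.modify p.1 0 (· + 1) else d) d)
      ((l.map (·.1)).foldl (fun d category => d.insert category (0 : Int)) PySem.Dict.empty)).items
      = l.map (fun p => (p.1, (p.2.countP q : Int))) := by
  set d0 := (l.map (·.1)).foldl (fun d category => d.insert category (0 : Int)) PySem.Dict.empty with hd0
  have hz : ∀ k, d0.getD k 0 = 0 := pv_init_zero _ _ (fun k => by simp)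
  have hk0 : d0.keys = l.map (·.1) := pv_init_keys _ hnd
  set counts := l.foldl (fun d p => p.2.foldl (fun d kw => if q kw then d.modify p.1 0 (· + 1) else d) d) d0 with hc
  have hkeys : counts.keys = l.map (·.1) := by
    rw [hc, pv_outer_keys q l d0 (fun p hp => by rw [hk0]; exact List.mem_map_of_mem hp), hk0]
  have hitems := PySem.Dict.items_eq_map_keys counts (by rw [hkeys]; exact hnd) 0
  rw [hitems, hkeys, List.map_map]
  refine List.map_congr_left (fun p hp => ?_)
  simp only [Function.comp]
  rw [hc, pv_count_at q l hnd d0 hz p hp]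

-- ---- the selection phase: B's running pair is the first two of A's stable descending sort ----

-- read off (best, second) from a list of (category, count)
def pvF2 (l : List (String × Int)) : Option (Int × String) × Option (Int × String) :=
  (l[0]?.map (fun x => (x.2, x.1)), l[1]?.map (fun x => (x.2, x.1)))

theorem pv_insert_firstTwo (x : String × Int) (acc : List (String × Int)) :
    pvF2 (PySem.List.insertBy (fun a b => decide ((fun y => y.2) b < (fun y => y.2) a)) x acc)
      = pvTop2Step (pvF2 acc) x.2 x.1 := by
  match acc with
  | [] => simp [PySem.List.insertBy, pvF2, pvTop2Step]
  | [a] =>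
    simp only [PySem.List.insertBy, pvF2, pvTop2Step]
    by_cases h : a.2 < x.2 <;> simp [h]
  | a :: b :: t =>
    simp only [PySem.List.insertBy, pvF2, pvTop2Step]
    by_cases h : a.2 < x.2
    · simp [h]
    · by_cases h2 : b.2 < x.2 <;> simp [h, h2]

theorem pv_fold_sim (cl : List (String × Int)) :
    ∀ (acc : List (String × Int)),
      cl.foldl (fun st x => pvTop2Step st x.2 x.1) (pvF2 acc)
        = pvF2 (cl.foldl (fun acc x =>
            PySem.List.insertBy (fun a b => decide ((fun y => y.2) b < (fun y => y.2) a)) x acc) acc) := by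
  induction cl with
  | nil => intro acc; rfl
  | cons x cl ih =>
    intro acc
    simp only [List.foldl_cons]
    rw [← pv_insert_firstTwo, ih]

theorem pv_top2_eq_sorted (cl : List (String × Int)) :
    cl.foldl (fun st x => pvTop2Step st x.2 x.1) (none, none)
      = pvF2 (PySem.List.sorted cl (fun y => y.2) true) := by
  rw [PySem.List.sorted_rev_eq_foldl_insertBy]
  have h0 : (none, none) = pvF2 ([] : List (String × Int)) := rfl
  rw [h0, pv_fold_sim]

-- keyword_map nonempty ⇒ the dict built from it has items
theorem pv_items_ne_nil (keyword_map : List (String × List String)) (h : keyword_map ≠ []) :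
    (PySem.Dict.ofList keyword_map).items ≠ [] := by
  match keyword_map, h with
  | p :: rest, _ =>
    intro hnil
    have hk : p.1 ∈ (PySem.Dict.ofList (p :: rest)).keys := by
      show p.1 ∈ (List.foldl (fun acc r => acc.insert r.1 r.2) PySem.Dict.empty (p :: rest)).keys
      rw [PySem.Dict.keys_foldl_insert_key (p :: rest) (fun x => x.1) (fun _ x => x.2) PySem.Dict.empty,
          PySem.Dict.keys_empty, PySem.Set.update_nil_left, PySem.Set.mem_ofList]
      simp
    rw [PySem.Dict.keys, hnil] at hk
    simp at hk

-- ===== VERDICT (by name: the statement is the Claim_ definition above) =====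
theorem classify_document_by_keywords_spec : Claim_equal_classify_document_by_keywords := by
  intro text keyword_map _ hpre
  unfold Spec_classify_document_by_keywords classify_document_by_keywords classify_document_by_keywords_alt
  set t := PySem.Str.lower text with ht
  set q : String → Bool := fun kw => PySem.Str.isIn (PySem.Str.lower kw) t with hq
  set L := (PySem.Dict.ofList keyword_map).items with hL
  have hnd : (L.map (·.1)).Nodup := PySem.Dict.nodup_keys_ofList keyword_map
  have hkeys : (PySem.Dict.ofList keyword_map).keys = L.map (·.1) := rfl
  -- counting phase
  have hcounts := pv_counts_items q L hnd
  simp only [hkeys]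
  rw [hcounts]
  -- selection phase
  set cl := L.map (fun p => (p.1, (p.2.countP q : Int))) with hcl
  have hB : L.foldl (fun st p => pvTop2Step st ((p.2.countP q : Int)) p.1) (none, none)
      = cl.foldl (fun st x => pvTop2Step st x.2 x.1) (none, none) := by
    rw [hcl, List.foldl_map]
  rw [hB, pv_top2_eq_sorted]
  have hclne : cl ≠ [] := by
    rw [hcl]
    simp only [ne_eq, List.map_eq_nil_iff]
    exact fun h => pv_items_ne_nil keyword_map hpre (hL ▸ h)
  rcases hsl : PySem.List.sorted cl (fun y => y.2) true with _ | ⟨a, rest⟩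
  · exact absurd ((PySem.List.sorted_eq_nil_iff cl (fun y => y.2) true).mp hsl) hclne
  · rcases rest with _ | ⟨b, ts⟩
    · simp [pvF2, PySem.List.pyGetD_zero_cons]
    · have hord : b.2 ≤ a.2 := by
        have hp := PySem.List.sorted_pairwise_rev cl (fun y => y.2)
        rw [hsl] at hp
        exact (List.pairwise_cons.mp hp).1 b List.mem_cons_self
      have h1 : PySem.List.pyGetD (a :: b :: ts) 1 ("", 0) = b := by simp [pysem]
      have habs : |a.2 - b.2| = a.2 - b.2 := abs_of_nonneg (by omega)
      simp only [pvF2, PySem.List.pyGetD_zero_cons, h1, List.length_cons,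
        List.getElem?_cons_zero, List.getElem?_cons_succ, Option.map_some, habs]
      rw [if_pos (by simp)]
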